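-- pv_equiv track=rewrite | github.com/Rodrigo3441/python_practicing_projects | Sorting Algorithms/insertion_sort.py | insertion_sort_old
-- ===== SOURCE A (Python) =====
-- def insertion_sort_old(arr: list) -> tuple[int, int, int, list]:
--     """
--     This function sorts a list using insertion sort algorithm
--     """
--     runs = 0
--     comparisons = 0
--     replacements = 0
--     size = len(arr)
--
--     for i in range(1,size):
--         key = arr[i]
--         j = i-1
--
--         runs += 1
--
--         while j >= 0 and arr[j] > key:
--             replacements += 1
--             arr[j+1] = arr[j]
--             j -= 1
--
--         arr[j+1] = key
--
--     return runs, comparisons, replacements, arr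
-- ===== SOURCE B (Python) =====
-- def insertion_sort_old(arr: list) -> tuple[int, int, int, list]:
--     """
--     Merge sort counting inversions: the shift count of insertion sort equals the
--     number of inversions, comparisons stays 0 and runs is len-1 (0 for empty).
--     Like A, the input list is sorted in place and returned.
--     """
--     def merge_count(xs):
--         if len(xs) <= 1:
--             return xs, 0
--         m = len(xs) // 2
--         left, a = merge_count(xs[:m])
--         right, b = merge_count(xs[m:])
--         merged = []
--         inv = 0
--         i = j = 0
--         while i < len(left) and j < len(right):
--             if right[j] < left[i]:
--                 merged.append(right[j])
--                 j += 1
--                 inv += len(left) - i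
--             else:
--                 merged.append(left[i])
--                 i += 1
--         merged.extend(left[i:])
--         merged.extend(right[j:])
--         return merged, a + b + inv
--
--     s, inv = merge_count(list(arr))
--     arr[:] = s
--     return max(len(arr) - 1, 0), 0, inv, arr
-- ===== Notes on version B (the rewrite author's own statement) =====
-- stated objective: faster
-- what changed: Replaces the quadratic shifting insertion sort by a merge sort that counts inversions (the shift count equals the inversion count; comparisons is always 0 and runs is len-1), sorting and counting in O(n log n).
import Mathlib
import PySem

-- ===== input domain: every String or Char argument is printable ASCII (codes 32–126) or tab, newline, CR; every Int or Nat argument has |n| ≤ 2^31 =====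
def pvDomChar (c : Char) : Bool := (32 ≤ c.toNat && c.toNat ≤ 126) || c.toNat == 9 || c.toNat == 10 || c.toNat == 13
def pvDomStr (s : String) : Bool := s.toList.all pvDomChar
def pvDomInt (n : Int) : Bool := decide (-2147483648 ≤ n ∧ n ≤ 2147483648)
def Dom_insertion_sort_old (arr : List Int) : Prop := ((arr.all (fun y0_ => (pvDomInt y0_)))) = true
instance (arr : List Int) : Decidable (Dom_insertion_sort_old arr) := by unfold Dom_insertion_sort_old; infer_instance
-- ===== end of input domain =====

-- B replaces A's quadratic shifting insertion sort by a merge sort counting inversions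
-- (shifts = inversions, comparisons = 0, runs = len-1); both Pythons sort the list in
-- place, so the equivalence proved here is about the return value (which contains it).

-- ===== PORT A =====
-- inner 'while j >= 0 and arr[j] > key' loop; the Nat argument is j+1, so 0 means j = -1.
-- arr[j] is read with getD: j is provably in range at every call (1 ≤ j+1 ≤ i < len arr).
def whileA (key : Int) : Int → List Int → Nat → Int × List Int
  | reps, a, 0 => (reps, a.set 0 key)
  | reps, a, j + 1 =>
    if a.getD j 0 > key then
      whileA key (reps + 1) (a.set (j + 1) (a.getD j 0)) j
    else (reps, a.set (j + 1) key)

-- body of 'for i in range(1, size)'; state = (runs, replacements, arr)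
def stepA (st : Int × Int × List Int) (i : Int) : Int × Int × List Int :=
  let key := st.2.2.getD i.toNat 0
  let (reps', a') := whileA key st.2.1 st.2.2 i.toNat
  (st.1 + 1, reps', a')

def insertion_sort_old (arr : List Int) : Int × Int × Int × List Int :=
  let size := arr.length
  let st := (PySem.List.pyRange 1 (size : Int) 1).foldl stepA (0, 0, arr)
  (st.1, 0, st.2.1, st.2.2)    -- comparisons is never incremented in A

-- ===== PORT B =====
-- merge of the two sorted halves, counting 'inv += len(left) - i' cross inversions
def mergeB : List Int → List Int → List Int × Int
  | [], r => (r, 0)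
  | a :: l, [] => (a :: l, 0)
  | a :: l, b :: r =>
    if b < a then
      let (m, inv) := mergeB (a :: l) r
      (b :: m, inv + ((a :: l).length : Int))
    else
      let (m, inv) := mergeB l (b :: r)
      (a :: m, inv)
  termination_by l r => l.length + r.length

def msortB (xs : List Int) : List Int × Int :=
  if h : xs.length ≤ 1 then (xs, 0)
  else
    let m := xs.length / 2
    let left := msortB (xs.take m)
    let right := msortB (xs.drop m)
    let merged := mergeB left.1 right.1
    (merged.1, left.2 + right.2 + merged.2)
  termination_by xs.length
  decreasing_by
  · simp only [List.length_take]; omega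
  · simp only [List.length_drop]; omega

def insertion_sort_old_alt (arr : List Int) : Int × Int × Int × List Int :=
  let s := msortB arr
  (max ((arr.length : Int) - 1) 0, 0, s.2, s.1)

-- ===== PRECONDITION & SPEC =====
def Spec_insertion_sort_old (arr : List Int) (out : Int × Int × Int × List Int) : Prop := out = insertion_sort_old_alt arr
instance (arr : List Int) (out : Int × Int × Int × List Int) : Decidable (Spec_insertion_sort_old arr out) := by unfold Spec_insertion_sort_old; infer_instance

-- ===== CLAIM (what is proved, stated in full; the proofs are below) =====
def Claim_equal_insertion_sort_old : Prop := ∀ (arr : List Int), Dom_insertion_sort_old arr → Spec_insertion_sort_old arr (insertion_sort_old arr)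

-- ===== LEMMAS AND PROOFS =====

-- Python-style stable insert: after all elements ≤ key, before the first one > key
def pyInsert (key : Int) : List Int → List Int
  | [] => [key]
  | x :: l => if key < x then key :: x :: l else x :: pyInsert key l

-- reference for A's loop: insert each element of rest, counting strictly-greater elements
def insAll : List Int → List Int → List Int × Int
  | sp, [] => (sp, 0)
  | sp, k :: rest =>
    ((insAll (pyInsert k sp) rest).1,
      ((sp.countP fun x => decide (k < x) : Nat) : Int) + (insAll (pyInsert k sp) rest).2)

-- number of inversions, recursively from the head
def invRef : List Int → Int
  | [] => 0
  | a :: l => ((l.countP fun x => decide (x < a) : Nat) : Int) + invRef l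

-- cross inversions: pairs (a ∈ l, b ∈ r) with b < a
def crossInv (l r : List Int) : Int :=
  (r.map (fun b => ((l.countP fun a => decide (b < a) : Nat) : Int))).sum

theorem pyInsert_perm (key : Int) (l : List Int) : (pyInsert key l).Perm (key :: l) := by
  induction l with
  | nil => simp [pyInsert]
  | cons x l ih =>
    simp only [pyInsert]
    split
    · exact List.Perm.refl _
    · exact (ih.cons x).trans (List.Perm.swap _ _ _)

theorem pyInsert_sorted (key : Int) (l : List Int) (h : l.Pairwise (· ≤ ·)) :
    (pyInsert key l).Pairwise (· ≤ ·) := by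
  induction l with
  | nil => simp [pyInsert]
  | cons x l ih =>
    simp only [pyInsert]
    rcases List.pairwise_cons.mp h with ⟨hx, hl⟩
    split
    · rename_i hk
      refine List.pairwise_cons.mpr ⟨?_, h⟩
      intro y hy
      rcases List.mem_cons.mp hy with hy | hy
      · omega
      · exact le_trans (le_of_lt hk) (hx y hy)
    · rename_i hk
      refine List.pairwise_cons.mpr ⟨?_, ih hl⟩
      intro y hy
      rcases List.mem_cons.mp ((pyInsert_perm key l).mem_iff.mp hy) with hy' | hy'
      · subst hy'; omega
      · exact hx y hy' 

theorem pyInsert_append_lt (key a : Int) (l : List Int) (h : key < a) :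
    pyInsert key (l ++ [a]) = pyInsert key l ++ [a] := by
  induction l with
  | nil => simp [pyInsert, h]
  | cons x l ih =>
    simp only [List.cons_append, pyInsert]
    split
    · rfl
    · simp [ih]

theorem pyInsert_all_le (key : Int) (l : List Int) (h : ∀ x ∈ l, x ≤ key) :
    pyInsert key l = l ++ [key] := by
  induction l with
  | nil => simp [pyInsert]
  | cons x l ih =>
    simp only [pyInsert]
    have hx := h x (by simp)
    rw [if_neg (by omega)]
    simp [ih (fun y hy => h y (by simp [hy]))]

theorem getD_append_len (l : List Int) (x : Int) (t : List Int) :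
    (l ++ x :: t).getD l.length 0 = x := by
  induction l with
  | nil => simp
  | cons y l ih => simp

theorem whileA_spec (u : List Int) : ∀ (v : List Int) (key reps : Int),
    u.Pairwise (· ≤ ·) → v ≠ [] →
    whileA key reps (u ++ v) u.length
      = (reps + ((u.countP fun x => decide (key < x) : Nat) : Int), pyInsert key u ++ v.tail) := by
  induction u using List.reverseRecOn with
  | nil =>
    intro v key reps _ hv
    match v, hv with
    | w :: t, _ => simp [whileA, pyInsert]
  | append_singleton u' a ih =>
    intro v key reps hs hv
    match v, hv with
    | w :: t, _ =>
      have hs' : u'.Pairwise (· ≤ ·) := (List.pairwise_append.mp hs).1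
      have hua : ∀ x ∈ u', x ≤ a := by
        intro x hx
        exact (List.pairwise_append.mp hs).2.2 x hx a (by simp)
      have hlen : (u' ++ [a]).length = u'.length + 1 := by simp
      rw [hlen]
      have hget : ((u' ++ [a]) ++ w :: t).getD u'.length 0 = a := by
        rw [List.append_assoc]; exact getD_append_len u' a ([] ++ w :: t)
      by_cases hk : key < a
      · have : whileA key reps ((u' ++ [a]) ++ w :: t) (u'.length + 1)
            = whileA key (reps + 1) (u' ++ (a :: a :: t)) u'.length := by
          simp only [whileA, hget]
          rw [if_pos (by omega)]
          congr 1
          rw [List.append_assoc]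
          have h1 : u'.length + 1 = (u' ++ [a]).length := by simp
          have : (u' ++ ([a] ++ w :: t)).set (u'.length + 1) a
              = u' ++ (([a] ++ w :: t).set 1 a) := by
            rw [List.set_append_right _ _ (by simp)]
            simp
          simpa using this
        rw [this, ih (a :: a :: t) key (reps + 1) hs' (by simp)]
        rw [List.countP_append, pyInsert_append_lt key a u' hk]
        simp only [List.countP_cons, List.countP_nil]
        rw [decide_eq_true hk]
        simp only [Prod.mk.injEq]
        refine ⟨?_, ?_⟩
        · push_cast; ring
        · simp
      · have hall : ∀ x ∈ u' ++ [a], x ≤ key := by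
          intro x hx
          rcases List.mem_append.mp hx with hx | hx
          · exact le_trans (hua x hx) (by omega)
          · simp at hx; omega
        have : whileA key reps ((u' ++ [a]) ++ w :: t) (u'.length + 1)
            = (reps, ((u' ++ [a]) ++ w :: t).set (u'.length + 1) key) := by
          simp only [whileA, hget]
          rw [if_neg (by omega)]
        rw [this]
        simp only [Prod.mk.injEq]
        refine ⟨?_, ?_⟩
        · have : (u' ++ [a]).countP (fun x => decide (key < x)) = 0 := by
            rw [List.countP_eq_zero]
            intro x hx
            simp only [decide_eq_true_eq]
            have := hall x hx
            omega
          rw [this]; simp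
        · rw [pyInsert_all_le key (u' ++ [a]) hall]
          have : ((u' ++ [a]) ++ w :: t).set (u'.length + 1) key
              = (u' ++ [a]) ++ (key :: t) := by
            rw [List.set_append_right _ _ (by simp)]
            simp
          rw [this]
          simp

theorem outer_spec (rest : List Int) : ∀ (sp : List Int) (runs reps : Int),
    sp.Pairwise (· ≤ ·) → sp ≠ [] →
    (PySem.List.pyRange (sp.length : Int) ((sp.length : Int) + rest.length) 1).foldl
        stepA (runs, reps, sp ++ rest)
      = (runs + rest.length, reps + (insAll sp rest).2, (insAll sp rest).1) := by
  induction rest with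
  | nil =>
    intro sp runs reps hs hne
    rw [PySem.List.pyRange_one_eq_nil (by simp)]
    simp [insAll]
  | cons k rest ih =>
    intro sp runs reps hs hne
    have hlt : (sp.length : Int) < (sp.length : Int) + (k :: rest).length := by
      simp only [List.length_cons]; push_cast; omega
    rw [PySem.List.pyRange_one_cons hlt]
    simp only [List.foldl_cons]
    have hstep : stepA (runs, reps, sp ++ k :: rest) (sp.length : Int)
        = (runs + 1, reps + ((sp.countP fun x => decide (k < x) : Nat) : Int),
            pyInsert k sp ++ rest) := by
      unfold stepA
      simp only [Int.toNat_natCast]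
      rw [getD_append_len, whileA_spec sp (k :: rest) k reps hs (by simp)]
      simp
    rw [hstep]
    have hlen2 : (pyInsert k sp).length = sp.length + 1 := by
      have := (pyInsert_perm k sp).length_eq; simpa using this
    have hne2 : pyInsert k sp ≠ [] := by
      intro h; rw [h] at hlen2; simp at hlen2
    have hIH := ih (pyInsert k sp) (runs + 1)
      (reps + ((sp.countP fun x => decide (k < x) : Nat) : Int))
      (pyInsert_sorted k sp hs) hne2
    rw [hlen2] at hIH
    have hrange : (PySem.List.pyRange ((sp.length : Int) + 1)
          ((sp.length : Int) + (k :: rest).length) 1)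
        = (PySem.List.pyRange (((sp.length + 1 : Nat)) : Int)
          (((sp.length + 1 : Nat) : Int) + rest.length) 1) := by
      congr 1 <;> (simp only [List.length_cons]; push_cast; ring)
    rw [hrange, hIH]
    simp only [insAll, List.length_cons, Prod.mk.injEq]
    exact ⟨by push_cast; ring, by ring, trivial⟩

theorem crossInv_cons_left (a : Int) (l r : List Int) :
    crossInv (a :: l) r = crossInv l r + ((r.countP fun y => decide (y < a) : Nat) : Int) := by
  induction r with
  | nil => simp [crossInv]
  | cons y r ih =>
    simp only [crossInv, List.map_cons, List.sum_cons] at ih ⊢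
    rw [List.countP_cons, List.countP_cons]
    by_cases hya : y < a
    · simp only [hya, decide_true, if_true]
      push_cast
      rw [ih]  -- note: ih has crossInv shape unfolded
      ring
    · simp only [hya, decide_false, if_false]
      push_cast
      rw [ih]
      ring

theorem crossInv_perm_left {l l' : List Int} (r : List Int) (h : l.Perm l') :
    crossInv l r = crossInv l' r := by
  unfold crossInv
  congr 1
  exact List.map_congr_left (fun b _ => by rw [h.countP_eq])

theorem crossInv_perm_right (l : List Int) {r r' : List Int} (h : r.Perm r') :
    crossInv l r = crossInv l r' := by
  unfold crossInv
  exact List.Perm.sum_eq (h.map _)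

theorem invRef_append (l r : List Int) :
    invRef (l ++ r) = invRef l + invRef r + crossInv l r := by
  induction l with
  | nil => simp [invRef, crossInv]
  | cons a l ih =>
    simp only [List.cons_append, invRef, List.countP_append]
    rw [ih, crossInv_cons_left]
    push_cast
    ring

theorem mergeB_spec (l r : List Int) : l.Pairwise (· ≤ ·) → r.Pairwise (· ≤ ·) →
    (mergeB l r).1.Perm (l ++ r) ∧ (mergeB l r).1.Pairwise (· ≤ ·) ∧ (mergeB l r).2 = crossInv l r := by
  induction l, r using mergeB.induct with
  | case1 r =>
    intro hl hr
    rw [mergeB]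
    refine ⟨by simp, hr, ?_⟩
    simp [crossInv]
  | case2 a l =>
    intro hl hr
    rw [mergeB]
    refine ⟨by simp, hl, ?_⟩
    simp [crossInv]
  | case3 a l b r hba m inv heq ih =>
    intro hl hr
    have hr' : r.Pairwise (· ≤ ·) := hr.tail
    have hbr : ∀ x ∈ r, b ≤ x := fun x hx => (List.pairwise_cons.mp hr).1 x hx
    obtain ⟨pm, sm, im⟩ := ih hl hr'
    have hunf : mergeB (a :: l) (b :: r)
        = (b :: (mergeB (a :: l) r).1, (mergeB (a :: l) r).2 + ((a :: l).length : Int)) := by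
      rw [mergeB]
      simp only [if_pos hba, heq]
    rw [hunf]
    refine ⟨?_, ?_, ?_⟩
    · exact (pm.cons b).trans List.perm_middle.symm
    · refine List.pairwise_cons.mpr ⟨?_, sm⟩
      intro x hx
      rcases List.mem_append.mp (pm.mem_iff.mp hx) with hx | hx
      · rcases List.mem_cons.mp hx with hx | hx
        · omega
        · have := (List.pairwise_cons.mp hl).1 x hx; omega
      · exact hbr x hx
    · simp only [crossInv, List.map_cons, List.sum_cons]
      have hcnt : (a :: l).countP (fun x => decide (b < x)) = (a :: l).length := by
        rw [List.countP_eq_length]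
        intro x hx
        simp only [decide_eq_true_eq]
        rcases List.mem_cons.mp hx with hx | hx
        · omega
        · have := (List.pairwise_cons.mp hl).1 x hx; omega
      rw [hcnt, im]
      simp only [crossInv]
      ring
  | case4 a l b r hba m inv heq ih =>
    intro hl hr
    have hl' : l.Pairwise (· ≤ ·) := hl.tail
    have hal : ∀ x ∈ l, a ≤ x := fun x hx => (List.pairwise_cons.mp hl).1 x hx
    have hbr : ∀ x ∈ r, b ≤ x := fun x hx => (List.pairwise_cons.mp hr).1 x hx
    obtain ⟨pm, sm, im⟩ := ih hl' hr
    have hunf : mergeB (a :: l) (b :: r) = (a :: (mergeB l (b :: r)).1, (mergeB l (b :: r)).2) := by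
      rw [mergeB]
      simp only [if_neg hba, heq]
    rw [hunf]
    refine ⟨?_, ?_, ?_⟩
    · exact pm.cons a
    · refine List.pairwise_cons.mpr ⟨?_, sm⟩
      intro x hx
      rcases List.mem_append.mp (pm.mem_iff.mp hx) with hx | hx
      · exact hal x hx
      · rcases List.mem_cons.mp hx with hx | hx
        · omega
        · have := hbr x hx; omega
    · rw [im, crossInv_cons_left]
      have : (b :: r).countP (fun y => decide (y < a)) = 0 := by
        rw [List.countP_eq_zero]
        intro y hy
        simp only [decide_eq_true_eq]
        rcases List.mem_cons.mp hy with hy | hy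
        · omega
        · have := hbr y hy; omega
      rw [this]
      simp

theorem msortB_spec (xs : List Int) :
    (msortB xs).1.Perm xs ∧ (msortB xs).1.Pairwise (· ≤ ·) ∧ (msortB xs).2 = invRef xs := by
  suffices h : ∀ (n : Nat) (xs : List Int), xs.length ≤ n →
      (msortB xs).1.Perm xs ∧ (msortB xs).1.Pairwise (· ≤ ·) ∧ (msortB xs).2 = invRef xs by
    exact h xs.length xs le_rfl
  intro n
  induction n with
  | zero =>
    intro xs hlen
    have hnil : xs = [] := List.eq_nil_of_length_eq_zero (by omega)
    subst hnil
    rw [msortB]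
    simp [invRef]
  | succ n ih =>
    intro xs hlen
    rw [msortB]
    by_cases h1 : xs.length ≤ 1
    · rw [dif_pos h1]
      match xs, h1 with
      | [], _ => simp [invRef]
      | [a], _ => simp [invRef]
    · rw [dif_neg h1]
      dsimp only
      have h2 : 2 ≤ xs.length := by omega
      have hm1 : 1 ≤ xs.length / 2 := by omega
      have hm2 : xs.length / 2 < xs.length := by omega
      obtain ⟨p1, s1, i1⟩ := ih (xs.take (xs.length / 2)) (by simp [List.length_take]; omega)
      obtain ⟨p2, s2, i2⟩ := ih (xs.drop (xs.length / 2)) (by simp [List.length_drop]; omega)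
      obtain ⟨pm, sm, im⟩ := mergeB_spec _ _ s1 s2
      refine ⟨?_, sm, ?_⟩
      · exact pm.trans ((p1.append p2).trans (by rw [List.take_append_drop]))
      · rw [im, i1, i2, crossInv_perm_left _ p1, crossInv_perm_right _ p2]
        conv_rhs => rw [← List.take_append_drop (xs.length / 2) xs]
        rw [invRef_append]

theorem insAll_spec (rest : List Int) : ∀ (sp : List Int), sp.Pairwise (· ≤ ·) →
    (insAll sp rest).1.Perm (sp ++ rest) ∧ (insAll sp rest).1.Pairwise (· ≤ ·) := by
  induction rest with
  | nil =>
    intro sp hs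
    simp only [insAll]
    exact ⟨by simp, hs⟩
  | cons k rest ih =>
    intro sp hs
    simp only [insAll]
    obtain ⟨hp, hs2⟩ := ih (pyInsert k sp) (pyInsert_sorted k sp hs)
    refine ⟨?_, hs2⟩
    refine hp.trans ?_
    refine (((pyInsert_perm k sp).append_right rest).trans ?_)
    exact List.perm_middle.symm

theorem insAll_inv (rest : List Int) : ∀ (sp p : List Int), sp.Perm p →
    invRef (p ++ rest) = invRef p + (insAll sp rest).2 := by
  induction rest with
  | nil =>
    intro sp p hperm
    simp [insAll]
  | cons k rest ih =>
    intro sp p hperm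
    simp only [insAll]
    have hmid : (pyInsert k sp).Perm (p ++ [k]) := by
      refine (pyInsert_perm k sp).trans ?_
      exact (hperm.cons k).trans (List.perm_append_singleton k p).symm
    have hih := ih (pyInsert k sp) (p ++ [k]) hmid
    have hassoc : p ++ k :: rest = (p ++ [k]) ++ rest := by simp
    rw [hassoc, hih, invRef_append p [k]]
    have hcross : crossInv p [k] = ((p.countP fun x => decide (k < x) : Nat) : Int) := by
      simp [crossInv]
    rw [hcross, hperm.countP_eq]
    have hk0 : invRef [k] = 0 := by simp [invRef]
    rw [hk0]
    ring

-- ===== VERDICT (by name: the statement is the Claim_ definition above) =====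
theorem insertion_sort_old_spec : Claim_equal_insertion_sort_old := by
  intro arr _
  unfold Spec_insertion_sort_old
  obtain ⟨pm, sm, im⟩ := msortB_spec arr
  cases arr with
  | nil =>
    show insertion_sort_old [] = insertion_sort_old_alt []
    unfold insertion_sort_old insertion_sort_old_alt
    rw [msortB]
    simp [PySem.List.pyRange_one_eq_nil (by norm_num : (0:Int) ≤ 1)]
  | cons a rest =>
    obtain ⟨ip, is⟩ := insAll_spec rest [a] (by simp)
    have hA : insertion_sort_old (a :: rest)
        = ((rest.length : Int), 0, (insAll [a] rest).2, (insAll [a] rest).1) := by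
      unfold insertion_sort_old
      have hout := outer_spec rest [a] 0 0 (by simp) (by simp)
      simp only [List.length_cons, List.length_nil, Nat.zero_add, Nat.cast_one,
        List.singleton_append, zero_add] at hout
      dsimp only
      simp only [List.length_cons]
      rw [show (((rest.length + 1 : Nat)) : Int) = (1 : Int) + (rest.length : Int) by
        push_cast; ring]
      rw [hout]
    have hlist : (msortB (a :: rest)).1 = (insAll [a] rest).1 := by
      refine List.Perm.eq_of_pairwise (fun x y _ _ h1 h2 => le_antisymm h1 h2) sm is
        (pm.trans ?_)
      simpa using ip.symm
    have hinv : (msortB (a :: rest)).2 = (insAll [a] rest).2 := by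
      rw [im]
      have h := insAll_inv rest [a] [a] (List.Perm.refl _)
      have h0 : invRef [a] = 0 := by simp [invRef]
      rw [List.singleton_append, h0] at h
      omega
    rw [hA]
    unfold insertion_sort_old_alt
    dsimp only
    rw [hlist, hinv]
    simp only [List.length_cons, Prod.mk.injEq]
    exact ⟨by push_cast; omega, trivial⟩
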